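-- pv_equiv track=rewrite | github.com/ivelinakaraivanova/SoftUniPythonAdvanced | src/Functions_Advanced_Lab/08_Expressions.py | expressions
-- ===== SOURCE A (Python) =====
-- def expressions(numbers, current_result, expression=""):
--     if not numbers:
--         return[(expression, current_result)]
--     result_plus = expressions(
--         numbers[1:],
--         current_result + numbers[0],
--         f'{expression}+{numbers[0]}'
--     )
--     result_minus = expressions(
--         numbers[1:],
--         current_result - numbers[0],
--         f'{expression}-{numbers[0]}'
--     )
--     return result_plus + result_minus
-- ===== SOURCE B (Python) =====
-- def expressions(numbers, current_result, expression=""):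
--     # Iterative breadth-first enumeration: extend each partial expression
--     # with '+num' and '-num' in turn; the list stays in the same order as
--     # the plus-before-minus recursion.
--     partials = [(expression, current_result)]
--     for num in numbers:
--         partials = [(f'{e}{s}{num}', v + num if s == '+' else v - num)
--                     for e, v in partials
--                     for s in '+-']
--     return partials
-- ===== Notes on version B (the rewrite author's own statement) =====
-- stated objective: idiomatic
-- what changed: Replaced the binary recursion (plus branch, minus branch, list append) by a single iterative loop that breadth-first expands a list of partial (expression, value) pairs with '+num' and '-num' for each number.
import Mathlib
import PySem

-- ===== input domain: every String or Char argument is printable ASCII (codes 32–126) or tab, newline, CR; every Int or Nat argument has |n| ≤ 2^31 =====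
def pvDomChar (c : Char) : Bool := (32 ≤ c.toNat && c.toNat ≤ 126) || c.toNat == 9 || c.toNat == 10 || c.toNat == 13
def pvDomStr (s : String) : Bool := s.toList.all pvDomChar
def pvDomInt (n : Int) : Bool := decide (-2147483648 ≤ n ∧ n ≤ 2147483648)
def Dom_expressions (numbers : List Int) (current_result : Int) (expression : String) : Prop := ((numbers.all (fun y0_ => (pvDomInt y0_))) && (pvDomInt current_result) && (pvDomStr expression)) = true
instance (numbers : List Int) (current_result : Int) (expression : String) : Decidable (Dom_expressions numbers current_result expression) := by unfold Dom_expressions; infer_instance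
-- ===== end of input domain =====

-- B replaces the binary recursion with an iterative breadth-first expansion of partial expressions (idiomatic; same cost).


-- ===== PORT A =====
def expressions (numbers : List Int) (current_result : Int) (expression : String) : List (String × Int) :=
  match numbers with
  | [] => [(expression, current_result)]
  | n :: rest =>
    let result_plus := expressions rest (current_result + n) (expression ++ "+" ++ PySem.Int.toStr n)
    let result_minus := expressions rest (current_result - n) (expression ++ "-" ++ PySem.Int.toStr n)
    result_plus ++ result_minus

-- ===== PORT B =====
def pvStep (ps : List (String × Int)) (num : Int) : List (String × Int) :=
  ps.flatMap (fun ev =>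
    [(ev.1 ++ "+" ++ PySem.Int.toStr num, ev.2 + num),
     (ev.1 ++ "-" ++ PySem.Int.toStr num, ev.2 - num)])

def expressions_alt (numbers : List Int) (current_result : Int) (expression : String) : List (String × Int) :=
  numbers.foldl pvStep [(expression, current_result)]

-- ===== PRECONDITION & SPEC =====
def Spec_expressions (numbers : List Int) (current_result : Int) (expression : String) (out : List (String × Int)) : Prop := out = expressions_alt numbers current_result expression
instance (numbers : List Int) (current_result : Int) (expression : String) (out : List (String × Int)) : Decidable (Spec_expressions numbers current_result expression out) := by unfold Spec_expressions; infer_instance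

-- ===== CLAIM (what is proved, stated in full; the proofs are below) =====
def Claim_equal_expressions : Prop := ∀ (numbers : List Int) (current_result : Int) (expression : String), Dom_expressions numbers current_result expression → Spec_expressions numbers current_result expression (expressions numbers current_result expression)

-- ===== LEMMAS AND PROOFS =====
theorem pvFoldl_step_append (ns : List Int) (a b : List (String × Int)) :
    ns.foldl pvStep (a ++ b) = ns.foldl pvStep a ++ ns.foldl pvStep b := by
  induction ns generalizing a b with
  | nil => simp
  | cons n rest ih =>
    simp only [List.foldl_cons]
    rw [show pvStep (a ++ b) n = pvStep a n ++ pvStep b n from by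
      simp [pvStep, List.flatMap_append]]
    exact ih _ _

theorem pvExpr_eq_foldl (ns : List Int) (cr : Int) (e : String) :
    expressions ns cr e = ns.foldl pvStep [(e, cr)] := by
  induction ns generalizing cr e with
  | nil => simp [expressions]
  | cons n rest ih =>
    simp only [expressions, List.foldl_cons]
    rw [ih, ih, ← pvFoldl_step_append]
    rfl

-- ===== VERDICT (by name: the statement is the Claim_ definition above) =====
theorem expressions_spec : Claim_equal_expressions := by
  intro numbers current_result expression _
  unfold Spec_expressions expressions_alt
  exact pvExpr_eq_foldl numbers current_result expression
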